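-- pv_equiv track=rewrite | github.com/Inco9001/usacotraining | chapter1/transform/transform.py | transformation7
-- ===== SOURCE A (Python) =====
-- def deepcopy(matrix):
--     temp_array = []
--     len_matrix = len(matrix)
--     for t in range(len_matrix):
--         temp_array2 = []
--         for x in range(len_matrix):
--             temp_array2.append(matrix[t][x])
--         temp_array.append(temp_array2)
--     return temp_array
--
-- def empty_matrix(input1):
--     temp_array = []
--     for t in range(input1):
--         temp_array2 = []
--         for x in range(input1):
--             temp_array2.append(0)
--         temp_array.append(temp_array2)
--     return temp_array
--
-- def transformation3(matrix): # does a 270 degree rotation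
--     input1 = len(matrix)
--     temp_array = deepcopy(matrix)
--     temp_array2 = empty_matrix(input1)
--     input2 = input1 - 1
--     for x in range(input1):
--         for t in range(input1):
--             temp_array2[input2 - t][x] = temp_array[x][t]
--     return temp_array2
--
-- def transformation7(matrix): # does a horizontal flip and a 270 degree rotation
--     input1 = len(matrix)
--     temp_array = deepcopy(matrix)
--     temp_array2 = empty_matrix(input1)
--     input2 = input1 - 1
--     for x in range(input1):
--         for t in range(input1):
--             temp_array2[x][input2 - t] = temp_array[x][t]
--     return transformation3(temp_array2)
-- ===== SOURCE B (Python) =====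
-- def transformation7(matrix):
--     # horizontal flip followed by 270-degree rotation == transpose
--     n = len(matrix)
--     return [[matrix[j][i] for j in range(n)] for i in range(n)]
-- ===== Notes on version B (the rewrite author's own statement) =====
-- stated objective: simpler
-- what changed: the flip pass, the 270-degree-rotation pass, the deepcopy and the empty-matrix preallocation are collapsed into one direct transpose comprehension out[i][j] = matrix[j][i] (one pass instead of four, no intermediate matrices)
import Mathlib
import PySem

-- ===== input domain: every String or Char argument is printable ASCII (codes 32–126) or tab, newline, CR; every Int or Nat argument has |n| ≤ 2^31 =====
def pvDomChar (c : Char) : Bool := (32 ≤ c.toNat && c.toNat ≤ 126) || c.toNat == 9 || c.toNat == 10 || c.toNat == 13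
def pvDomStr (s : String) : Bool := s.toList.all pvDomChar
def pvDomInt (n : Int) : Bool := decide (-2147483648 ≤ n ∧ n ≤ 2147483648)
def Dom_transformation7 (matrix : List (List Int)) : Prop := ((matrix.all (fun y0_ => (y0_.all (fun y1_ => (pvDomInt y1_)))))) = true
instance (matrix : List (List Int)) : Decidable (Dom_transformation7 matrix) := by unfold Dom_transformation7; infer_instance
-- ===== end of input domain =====

-- B collapses A's four passes (deepcopy, empty-matrix, flip loop, 270°-rotation helper) into one
-- direct transpose pass out[i][j] = matrix[j][i]; objective: simpler.

-- ===== PORT A =====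
-- matrix[i][j] read; Pre_ keeps every such index in range, so the 0/[] defaults never fire.
def pvGet2 (a : List (List Int)) (i j : Nat) : Int := (a.getD i []).getD j 0
-- the assignment temp_array2[i][j] = v
def pvSet2 (a : List (List Int)) (i j : Nat) (v : Int) : List (List Int) :=
  a.modify i (fun r => r.set j v)

def pvDeepcopy (m : List (List Int)) : List (List Int) :=
  (List.range m.length).map (fun t => (List.range m.length).map (fun x => pvGet2 m t x))

def pvEmptyMatrix (n : Nat) : List (List Int) :=
  (List.range n).map (fun _ => (List.range n).map (fun _ => (0 : Int)))

def pvTransformation3 (matrix : List (List Int)) : List (List Int) :=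
  let n := matrix.length
  let T := pvDeepcopy matrix
  (List.range n).foldl
    (fun a x => (List.range n).foldl (fun a t => pvSet2 a (n - 1 - t) x (pvGet2 T x t)) a)
    (pvEmptyMatrix n)

def transformation7 (matrix : List (List Int)) : List (List Int) :=
  let n := matrix.length
  let T := pvDeepcopy matrix
  let B2 := (List.range n).foldl
    (fun a x => (List.range n).foldl (fun a t => pvSet2 a x (n - 1 - t) (pvGet2 T x t)) a)
    (pvEmptyMatrix n)
  pvTransformation3 B2

-- ===== PORT B =====
def transformation7_alt (matrix : List (List Int)) : List (List Int) :=
  let n := matrix.length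
  (List.range n).map (fun i => (List.range n).map (fun j => pvGet2 matrix j i))

-- ===== PRECONDITION & SPEC =====
-- Pre_ excludes exactly the ragged inputs with a row shorter than len(matrix), on which the
-- Python A (and the Python B alike) raises IndexError.
def Pre_transformation7 (matrix : List (List Int)) : Prop :=
  ∀ r ∈ matrix, matrix.length ≤ r.length
instance (matrix : List (List Int)) : Decidable (Pre_transformation7 matrix) := by
  unfold Pre_transformation7; infer_instance

def pvWitness_transformation7 : List (List Int) := [[1, 2], [3, 4]]

def Spec_transformation7 (matrix : List (List Int)) (out : List (List Int)) : Prop := out = transformation7_alt matrix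
instance (matrix : List (List Int)) (out : List (List Int)) : Decidable (Spec_transformation7 matrix out) := by unfold Spec_transformation7; infer_instance

-- ===== CLAIM (what is proved, stated in full; the proofs are below) =====
def Claim_equal_transformation7 : Prop := ∀ (matrix : List (List Int)), Dom_transformation7 matrix → Pre_transformation7 matrix → Spec_transformation7 matrix (transformation7 matrix)

-- ===== LEMMAS AND PROOFS =====

-- proof-only helpers: the nested write loops seen as one fold over index pairs
def pvStep (f g : Nat → Nat → Nat) (v : Nat → Nat → Int)
    (a : List (List Int)) (p : Nat × Nat) : List (List Int) :=
  pvSet2 a (f p.1 p.2) (g p.1 p.2) (v p.1 p.2)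

def pvPairs (n : Nat) : List (Nat × Nat) :=
  (List.range n).flatMap (fun x => (List.range n).map (fun t => (x, t)))

lemma mem_pvPairs {n x t : Nat} : (x, t) ∈ pvPairs n ↔ x < n ∧ t < n := by
  simp [pvPairs]

lemma nested_eq_pairs (f g : Nat → Nat → Nat) (v : Nat → Nat → Int) (n : Nat)
    (a0 : List (List Int)) :
    (List.range n).foldl
      (fun a x => (List.range n).foldl (fun a t => pvSet2 a (f x t) (g x t) (v x t)) a) a0
      = (pvPairs n).foldl (pvStep f g v) a0 := by
  simp [pvPairs, List.flatMap_def, List.foldl_flatten, List.foldl_map, pvStep]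

lemma length_pvSet2 (a : List (List Int)) (i j : Nat) (v : Int) :
    (pvSet2 a i j v).length = a.length := by
  simp [pvSet2]

lemma rowlen_pvSet2 (a : List (List Int)) (i j : Nat) (v : Int) (i' : Nat) :
    ((pvSet2 a i j v).getD i' []).length = (a.getD i' []).length := by
  simp only [pvSet2, List.getD_eq_getElem?_getD, List.getElem?_modify]
  cases h : a[i']? with
  | none => simp
  | some r =>
    simp only [Option.getD_some]
    split <;> simp

lemma pvGet2_set2_ne (a : List (List Int)) (i j : Nat) (v : Int) (i' j' : Nat)
    (h : i ≠ i' ∨ j ≠ j') :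
    pvGet2 (pvSet2 a i j v) i' j' = pvGet2 a i' j' := by
  simp only [pvGet2, pvSet2, List.getD_eq_getElem?_getD, List.getElem?_modify]
  cases hrow : a[i']? with
  | none => simp
  | some r =>
    simp only [Option.getD_some]
    by_cases hii : i = i'
    · rcases h with h | hjj
      · exact absurd hii h
      · simp [hii, hjj]
    · simp [hii]

lemma pvGet2_set2_eq (a : List (List Int)) (i j : Nat) (v : Int)
    (hi : i < a.length) (hj : j < (a.getD i []).length) :
    pvGet2 (pvSet2 a i j v) i j = v := by
  have h : a[i]? = some a[i] := List.getElem?_eq_getElem hi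
  have hj' : j < a[i].length := by
    simpa [List.getD_eq_getElem?_getD, h] using hj
  simp [pvGet2, pvSet2, List.getD_eq_getElem?_getD, h, hj']

lemma foldl_step_length (f g : Nat → Nat → Nat) (v : Nat → Nat → Int)
    (ps : List (Nat × Nat)) (a : List (List Int)) :
    (ps.foldl (pvStep f g v) a).length = a.length := by
  induction ps generalizing a with
  | nil => rfl
  | cons p ps ih => simp [List.foldl_cons, ih, pvStep, length_pvSet2]

lemma foldl_step_rowlen (f g : Nat → Nat → Nat) (v : Nat → Nat → Int)
    (ps : List (Nat × Nat)) (a : List (List Int)) (i : Nat) :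
    ((ps.foldl (pvStep f g v) a).getD i []).length = (a.getD i []).length := by
  induction ps generalizing a with
  | nil => rfl
  | cons p ps ih =>
    rw [List.foldl_cons, ih]
    exact rowlen_pvSet2 a (f p.1 p.2) (g p.1 p.2) (v p.1 p.2) i

lemma foldl_step_get2_nohit (f g : Nat → Nat → Nat) (v : Nat → Nat → Int)
    (ps : List (Nat × Nat)) (a : List (List Int)) (i j : Nat)
    (h : ∀ p ∈ ps, ¬(f p.1 p.2 = i ∧ g p.1 p.2 = j)) :
    pvGet2 (ps.foldl (pvStep f g v) a) i j = pvGet2 a i j := by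
  induction ps generalizing a with
  | nil => rfl
  | cons p ps ih =>
    rw [List.foldl_cons, ih _ (fun q hq => h q (List.mem_cons_of_mem _ hq))]
    have hp := h p List.mem_cons_self
    rcases Decidable.not_and_iff_or_not.mp hp with h1 | h2
    · exact pvGet2_set2_ne _ _ _ _ _ _ (Or.inl h1)
    · exact pvGet2_set2_ne _ _ _ _ _ _ (Or.inr h2)

lemma foldl_step_get2_hit (f g : Nat → Nat → Nat) (v : Nat → Nat → Int)
    (ps : List (Nat × Nat)) (a : List (List Int)) (i j x0 t0 : Nat)
    (hmem : (x0, t0) ∈ ps) (hf : f x0 t0 = i) (hg : g x0 t0 = j)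
    (huniq : ∀ p ∈ ps, f p.1 p.2 = i → g p.1 p.2 = j → p = (x0, t0))
    (hi : i < a.length) (hj : j < (a.getD i []).length) :
    pvGet2 (ps.foldl (pvStep f g v) a) i j = v x0 t0 := by
  induction ps generalizing a with
  | nil => cases hmem
  | cons p ps ih =>
    rw [List.foldl_cons]
    by_cases hmem' : (x0, t0) ∈ ps
    · refine ih _ hmem' (fun q hq => huniq q (List.mem_cons_of_mem _ hq)) ?_ ?_
      · rw [show pvStep f g v a p = pvSet2 a (f p.1 p.2) (g p.1 p.2) (v p.1 p.2) from rfl,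
          length_pvSet2]
        exact hi
      · rw [show pvStep f g v a p = pvSet2 a (f p.1 p.2) (g p.1 p.2) (v p.1 p.2) from rfl,
          rowlen_pvSet2]
        exact hj
    · have hp : p = (x0, t0) := by
        rcases List.mem_cons.mp hmem with h | h
        · exact h.symm
        · exact absurd h hmem'
      subst hp
      rw [foldl_step_get2_nohit]
      · simp only [pvStep, hf, hg]
        exact pvGet2_set2_eq _ _ _ _ hi hj
      · intro q hq hq'
        exact hmem' (huniq q (List.mem_cons_of_mem _ hq) hq'.1 hq'.2 ▸ hq)

lemma length_pvEmpty (n : Nat) : (pvEmptyMatrix n).length = n := by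
  simp [pvEmptyMatrix]

lemma rowlen_pvEmpty (n i : Nat) (hi : i < n) :
    ((pvEmptyMatrix n).getD i []).length = n := by
  have h : i < (pvEmptyMatrix n).length := by rw [length_pvEmpty]; exact hi
  rw [List.getD_eq_getElem _ _ h]
  simp [pvEmptyMatrix]

lemma pvGet2_mapmap (n : Nat) (h : Nat → Nat → Int) (i j : Nat) (hi : i < n) (hj : j < n) :
    pvGet2 ((List.range n).map (fun t => (List.range n).map (fun x => h t x))) i j = h i j := by
  have h1 : i < ((List.range n).map (fun t => (List.range n).map (fun x => h t x))).length := by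
    simpa using hi
  rw [pvGet2, List.getD_eq_getElem _ _ h1]
  simp [hj]

lemma pvGet2_deepcopy (m : List (List Int)) (i j : Nat)
    (hi : i < m.length) (hj : j < m.length) :
    pvGet2 (pvDeepcopy m) i j = pvGet2 m i j :=
  pvGet2_mapmap m.length (fun t x => pvGet2 m t x) i j hi hj

-- the generic "matrix built by an (x,t)-indexed write loop" characterisation
lemma nested_get2 (f g : Nat → Nat → Nat) (v : Nat → Nat → Int) (n : Nat) (i j x0 t0 : Nat)
    (hx0 : x0 < n) (ht0 : t0 < n) (hf : f x0 t0 = i) (hg : g x0 t0 = j)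
    (hi : i < n) (hj : j < n)
    (huniq : ∀ x t, x < n → t < n → f x t = i → g x t = j → x = x0 ∧ t = t0) :
    pvGet2 ((List.range n).foldl
      (fun a x => (List.range n).foldl (fun a t => pvSet2 a (f x t) (g x t) (v x t)) a)
      (pvEmptyMatrix n)) i j = v x0 t0 := by
  rw [nested_eq_pairs]
  exact foldl_step_get2_hit f g v (pvPairs n) (pvEmptyMatrix n) i j x0 t0
    (mem_pvPairs.mpr ⟨hx0, ht0⟩) hf hg
    (by
      rintro ⟨x, t⟩ hmem hf' hg'
      obtain ⟨hx, ht⟩ := mem_pvPairs.mp hmem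
      obtain ⟨h1, h2⟩ := huniq x t hx ht hf' hg'
      simp [h1, h2])
    (by rw [length_pvEmpty]; exact hi)
    (by rw [rowlen_pvEmpty n i hi]; exact hj)

lemma nested_length (f g : Nat → Nat → Nat) (v : Nat → Nat → Int) (n : Nat) :
    ((List.range n).foldl
      (fun a x => (List.range n).foldl (fun a t => pvSet2 a (f x t) (g x t) (v x t)) a)
      (pvEmptyMatrix n)).length = n := by
  rw [nested_eq_pairs, foldl_step_length, length_pvEmpty]

lemma nested_rowlen (f g : Nat → Nat → Nat) (v : Nat → Nat → Int) (n i : Nat) (hi : i < n) :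
    (((List.range n).foldl
      (fun a x => (List.range n).foldl (fun a t => pvSet2 a (f x t) (g x t) (v x t)) a)
      (pvEmptyMatrix n)).getD i []).length = n := by
  rw [nested_eq_pairs, foldl_step_rowlen, rowlen_pvEmpty n i hi]

lemma getElem_eq_pvGet2 (a : List (List Int)) (i j : Nat)
    (hi : i < a.length) (hj : j < a[i].length) :
    a[i][j] = pvGet2 a i j := by
  rw [pvGet2, List.getD_eq_getElem _ _ hi, List.getD_eq_getElem _ _ hj]

-- ===== VERDICT (by name: the statement is the Claim_ definition above) =====
theorem transformation7_spec : Claim_equal_transformation7 := by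
  intro matrix _ _
  show transformation7 matrix = transformation7_alt matrix
  have hA : transformation7 matrix = pvTransformation3
      ((List.range matrix.length).foldl
        (fun a x => (List.range matrix.length).foldl
          (fun a t => pvSet2 a x (matrix.length - 1 - t) (pvGet2 (pvDeepcopy matrix) x t)) a)
        (pvEmptyMatrix matrix.length)) := rfl
  have hAlt : transformation7_alt matrix
      = (List.range matrix.length).map
          (fun i => (List.range matrix.length).map (fun j => pvGet2 matrix j i)) := rfl
  rw [hA, hAlt]
  set n := matrix.length with hn
  set B2 := (List.range n).foldl
    (fun a x => (List.range n).foldl (fun a t => pvSet2 a x (n - 1 - t) (pvGet2 (pvDeepcopy matrix) x t)) a)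
    (pvEmptyMatrix n) with hB2
  have hA2 : pvTransformation3 B2
      = (List.range B2.length).foldl
          (fun a x => (List.range B2.length).foldl
            (fun a t => pvSet2 a (B2.length - 1 - t) x (pvGet2 (pvDeepcopy B2) x t)) a)
          (pvEmptyMatrix B2.length) := rfl
  rw [hA2]
  -- shape of B2
  have hB2len : B2.length = n := nested_length (fun x _ => x) (fun _ t => n - 1 - t) _ n
  have hB2get : ∀ i j, i < n → j < n → pvGet2 B2 i j = pvGet2 matrix i (n - 1 - j) := by
    intro i j hi hj
    rw [hB2]
    rw [nested_get2 (fun x _ => x) (fun _ t => n - 1 - t) _ n i j i (n - 1 - j)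
      hi (by omega) rfl (by show n - 1 - (n - 1 - j) = j; omega) hi hj
      (by
        intro x t hx ht h1 h2
        have h1' : x = i := h1
        have h2' : n - 1 - t = j := h2
        exact ⟨by omega, by omega⟩)]
    exact pvGet2_deepcopy matrix i (n - 1 - j) hi (by omega)
  -- entries of the final matrix
  have hRget : ∀ i j, i < n → j < n →
      pvGet2 ((List.range B2.length).foldl
        (fun a x => (List.range B2.length).foldl
          (fun a t => pvSet2 a (B2.length - 1 - t) x (pvGet2 (pvDeepcopy B2) x t)) a)
        (pvEmptyMatrix B2.length)) i j = pvGet2 matrix j i := by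
    intro i j hi hj
    rw [hB2len]
    rw [nested_get2 (fun _ t => n - 1 - t) (fun x _ => x) _ n i j j (n - 1 - i)
      hj (by omega) (by show n - 1 - (n - 1 - i) = i; omega) rfl hi hj
      (by
        intro x t hx ht h1 h2
        have h1' : n - 1 - t = i := h1
        have h2' : x = j := h2
        exact ⟨by omega, by omega⟩)]
    rw [pvGet2_deepcopy B2 j (n - 1 - i) (by rw [hB2len]; omega) (by rw [hB2len]; omega)]
    rw [hB2get j (n - 1 - i) hj (by omega)]
    congr 1
    omega
  -- extensionality
  apply List.ext_getElem
  · rw [hB2len]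
    rw [nested_length (fun _ t => n - 1 - t) (fun x _ => x) _ n]
    simp
  · intro i h1 h2
    have hi : i < n := by simpa using h2
    apply List.ext_getElem
    · have := nested_rowlen (fun _ t => B2.length - 1 - t) (fun x _ => x)
        (fun x t => pvGet2 (pvDeepcopy B2) x t) B2.length i (by rw [hB2len]; exact hi)
      rw [List.getD_eq_getElem _ _ h1] at this
      rw [this, hB2len]
      simp
    · intro j h3 h4
      have hj : j < n := by simpa using h4
      rw [getElem_eq_pvGet2 _ _ _ h1 h3, hRget i j hi hj]
      simp
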